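-- pv_equiv track=rewrite | github.com/brooketogo98-cpu/flipperflipper | Core/elite_commands/elite_crackpassword.py | _detect_hash_type
-- ===== SOURCE A (Python) =====
-- def _detect_hash_type(hash_value: str) -> str:
--     """Detect hash type based on length and format"""
--
--     hash_clean = hash_value.strip().lower()
--     length = len(hash_clean)
--
--     # Common hash type detection
--     if length == 32 and all(c in '0123456789abcdef' for c in hash_clean):
--         return "md5"
--     elif length == 40 and all(c in '0123456789abcdef' for c in hash_clean):
--         return "sha1"
--     elif length == 64 and all(c in '0123456789abcdef' for c in hash_clean):
--         return "sha256"
--     elif length == 128 and all(c in '0123456789abcdef' for c in hash_clean):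
--         return "sha512"
--     elif length == 32 and ':' not in hash_clean:
--         return "ntlm"
--     elif ':' in hash_clean:
--         parts = hash_clean.split(':')
--         if len(parts) == 2 and len(parts[1]) == 32:
--             return "ntlm"
--
--     return "unknown"
-- ===== SOURCE B (Python) =====
-- # B: single pass over the cleaned string computing (is_hex, colon count, chars since
-- # last colon), plus a length table, instead of A's repeated all()-scans and split().
-- _HEX_LENGTHS = {32: "md5", 40: "sha1", 64: "sha256", 128: "sha512"}
--
-- def _detect_hash_type(hash_value: str) -> str:
--     h = hash_value.strip().lower()
--     is_hex = True
--     colons = 0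
--     tail = 0
--     for c in h:
--         is_hex = is_hex and c in "0123456789abcdef"
--         if c == ':':
--             colons += 1
--             tail = 0
--         else:
--             tail += 1
--     n = len(h)
--     if is_hex and n in _HEX_LENGTHS:
--         return _HEX_LENGTHS[n]
--     if n == 32 and colons == 0:
--         return "ntlm"
--     if colons == 1 and tail == 32:
--         return "ntlm"
--     return "unknown"
-- ===== Notes on version B (the rewrite author's own statement) =====
-- stated objective: alternative
-- what changed: Replaces A's four separate all()-hex scans plus the colon membership test and colon split with one single pass accumulating (is_hex, colon count, chars since last colon) and a length-to-name table lookup.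
import Mathlib
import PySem

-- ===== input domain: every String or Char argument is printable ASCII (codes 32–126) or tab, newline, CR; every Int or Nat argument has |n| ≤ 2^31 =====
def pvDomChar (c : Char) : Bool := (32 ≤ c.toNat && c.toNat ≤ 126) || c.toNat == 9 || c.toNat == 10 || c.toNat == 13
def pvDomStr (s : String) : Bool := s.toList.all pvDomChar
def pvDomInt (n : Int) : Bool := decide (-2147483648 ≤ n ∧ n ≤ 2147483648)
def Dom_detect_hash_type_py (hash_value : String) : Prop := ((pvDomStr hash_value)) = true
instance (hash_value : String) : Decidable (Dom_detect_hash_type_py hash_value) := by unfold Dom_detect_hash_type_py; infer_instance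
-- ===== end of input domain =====

-- B replaces A's four all()-hex scans, ':' membership test and split(':') by one single
-- pass accumulating (is_hex, colon count, chars since last colon) plus a length table.

def pvHexDigits : List Char := "0123456789abcdef".toList

-- ===== PORT A =====
def detect_hash_type_py (hash_value : String) : String :=
  let hash_clean := PySem.Chars.lower (PySem.Chars.strip hash_value.toList)
  let length := hash_clean.length
  if length == 32 && hash_clean.all (fun c => PySem.Chars.isIn [c] pvHexDigits) then "md5"
  else if length == 40 && hash_clean.all (fun c => PySem.Chars.isIn [c] pvHexDigits) then "sha1"
  else if length == 64 && hash_clean.all (fun c => PySem.Chars.isIn [c] pvHexDigits) then "sha256"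
  else if length == 128 && hash_clean.all (fun c => PySem.Chars.isIn [c] pvHexDigits) then "sha512"
  else if length == 32 && !(PySem.Chars.isIn [':'] hash_clean) then "ntlm"
  else if PySem.Chars.isIn [':'] hash_clean then
    let parts := PySem.Chars.splitOn hash_clean [':']
    if parts.length == 2 && (PySem.List.pyGetD parts 1 []).length == 32 then "ntlm"
    else "unknown"
  else "unknown"

-- ===== PORT B =====
def pvHexDigitsB : List Char := "0123456789abcdef".toList

def pvHexTable : PySem.Dict Int String :=
  PySem.Dict.mk [(32, "md5"), (40, "sha1"), (64, "sha256"), (128, "sha512")]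

def pvStep (s : Bool × Int × Int) (c : Char) : Bool × Int × Int :=
  let ih := s.1 && PySem.Chars.isIn [c] pvHexDigitsB
  if c == ':' then (ih, s.2.1 + 1, 0) else (ih, s.2.1, s.2.2 + 1)

def detect_hash_type_py_alt (hash_value : String) : String :=
  let h := PySem.Chars.lower (PySem.Chars.strip hash_value.toList)
  let st := h.foldl pvStep (true, 0, 0)
  let n : Int := PySem.Chars.len h
  if st.1 && pvHexTable.contains n then pvHexTable.getD n ""
  else if n == 32 && st.2.1 == 0 then "ntlm"
  else if st.2.1 == 1 && st.2.2 == 32 then "ntlm"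
  else "unknown"

-- ===== PRECONDITION & SPEC =====
def Spec_detect_hash_type_py (hash_value : String) (out : String) : Prop := out = detect_hash_type_py_alt hash_value
instance (hash_value : String) (out : String) : Decidable (Spec_detect_hash_type_py hash_value out) := by unfold Spec_detect_hash_type_py; infer_instance

-- ===== CLAIM (what is proved, stated in full; the proofs are below) =====
def Claim_equal_detect_hash_type_py : Prop := ∀ (hash_value : String), Dom_detect_hash_type_py hash_value → Spec_detect_hash_type_py hash_value (detect_hash_type_py hash_value)

-- ===== LEMMAS AND PROOFS =====

-- structural model of PySem.Chars.splitOn for the single-character separator ':'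
def pvSp (l cur : List Char) : List (List Char) :=
  match l with
  | [] => [cur.reverse]
  | x :: r => if x = ':' then cur.reverse :: pvSp r [] else pvSp r (x :: cur)

theorem pvGo_eq (fuel : Nat) : ∀ (l cur : List Char) (acc : List (List Char)),
    l.length < fuel →
    PySem.Chars.splitOn.go [':'] fuel l cur acc = acc.reverse ++ pvSp l cur := by
  induction fuel with
  | zero => intro l cur acc h; omega
  | succ f ih =>
    intro l cur acc h
    cases l with
    | nil => simp [PySem.Chars.splitOn.go, pvSp]
    | cons c rest =>
      by_cases hc : c = ':'
      · subst hc
        simp only [PySem.Chars.splitOn.go, pvSp]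
        rw [if_pos (by simp), show List.drop [':'].length (':' :: rest) = rest by simp]
        rw [ih rest [] (List.reverse cur :: acc) (by simpa using Nat.lt_of_succ_lt_succ h)]
        simp
      · simp only [PySem.Chars.splitOn.go, pvSp]
        rw [if_neg (by simp [List.isPrefixOf]; exact fun e => hc e.symm), if_neg hc]
        exact ih rest (c :: cur) acc (by simpa using Nat.lt_of_succ_lt_succ h)

theorem pvSplitOn_eq (cs : List Char) :
    PySem.Chars.splitOn cs [':'] = pvSp cs [] := by
  rw [PySem.Chars.splitOn, pvGo_eq (cs.length + 1) cs [] [] (by omega)]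
  simp

theorem pvSp_length (l : List Char) : ∀ cur, (pvSp l cur).length = l.count ':' + 1 := by
  induction l with
  | nil => intro cur; simp [pvSp]
  | cons x r ih =>
    intro cur
    by_cases hx : x = ':'
    · subst hx; simp [pvSp, ih]
    · simp [pvSp, hx, ih]

theorem pvSp_no_colon (v : List Char) (hv : ':' ∉ v) : ∀ cur, pvSp v cur = [cur.reverse ++ v] := by
  induction v with
  | nil => intro cur; simp [pvSp]
  | cons x r ih =>
    intro cur
    have hx : x ≠ ':' := fun h => hv (h ▸ List.mem_cons_self)
    have hr : ':' ∉ r := fun h => hv (List.mem_cons_of_mem _ h)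
    simp [pvSp, hx, ih hr]

theorem pvSp_split (u : List Char) (hu : ':' ∉ u) (v : List Char) :
    ∀ cur, pvSp (u ++ ':' :: v) cur = (cur.reverse ++ u) :: pvSp v [] := by
  induction u with
  | nil => intro cur; simp [pvSp]
  | cons x r ih =>
    intro cur
    have hx : x ≠ ':' := fun h => hu (h ▸ List.mem_cons_self)
    have hr : ':' ∉ r := fun h => hu (List.mem_cons_of_mem _ h)
    simp [pvSp, hx, ih hr]

theorem pvIsIn_singleton (c : Char) (s : List Char) :
    PySem.Chars.isIn [c] s = true ↔ c ∈ s := by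
  rw [PySem.Chars.isIn_iff_infix]
  constructor
  · intro h
    exact (List.singleton_sublist.mp h.sublist)
  · intro h
    obtain ⟨pre, suf, rfl⟩ := List.append_of_mem h
    exact ⟨pre, suf, by simp⟩

theorem pvHexDigitsB_eq : pvHexDigitsB = pvHexDigits := rfl

theorem pvFold_fst (cs : List Char) : ∀ s : Bool × Int × Int,
    (cs.foldl pvStep s).1 = (s.1 && cs.all (fun c => PySem.Chars.isIn [c] pvHexDigits)) := by
  induction cs with
  | nil => intro s; simp
  | cons c r ih =>
    intro s
    by_cases hc : c = ':' <;>
      simp [pvStep, pvHexDigitsB_eq, hc, ih, Bool.and_assoc]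

theorem pvFold_count (cs : List Char) : ∀ s : Bool × Int × Int,
    (cs.foldl pvStep s).2.1 = s.2.1 + cs.count ':' := by
  induction cs with
  | nil => intro s; simp
  | cons c r ih =>
    intro s
    by_cases hc : c = ':'
    · subst hc; simp [pvStep, ih]; ring
    · simp [pvStep, hc, ih]

theorem pvFold_tail_no_colon (cs : List Char) (h : ':' ∉ cs) : ∀ s : Bool × Int × Int,
    (cs.foldl pvStep s).2.2 = s.2.2 + cs.length := by
  induction cs with
  | nil => intro s; simp
  | cons c r ih =>
    intro s
    have hc : c ≠ ':' := fun e => h (e ▸ List.mem_cons_self)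
    have hr : ':' ∉ r := fun e => h (List.mem_cons_of_mem _ e)
    simp [pvStep, hc, ih hr]
    ring

theorem pvCount_one_decomp (cs : List Char) (h : cs.count ':' = 1) :
    ∃ u v, cs = u ++ ':' :: v ∧ ':' ∉ u ∧ ':' ∉ v := by
  have hmem : ':' ∈ cs := by
    by_contra hm
    rw [List.count_eq_zero_of_not_mem hm] at h
    omega
  obtain ⟨u, v, rfl⟩ := List.append_of_mem hmem
  simp only [List.count_append, List.count_cons_self] at h
  refine ⟨u, v, rfl, ?_, ?_⟩
  · intro hu
    have h1 : 1 ≤ u.count ':' := List.one_le_count_iff.mpr hu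
    omega
  · intro hv
    have h1 : 1 ≤ v.count ':' := List.one_le_count_iff.mpr hv
    omega

-- ===== VERDICT (by name: the statement is the Claim_ definition above) =====
theorem detect_hash_type_py_spec : Claim_equal_detect_hash_type_py := by
  intro hash_value _
  unfold Spec_detect_hash_type_py detect_hash_type_py detect_hash_type_py_alt
  generalize PySem.Chars.lower (PySem.Chars.strip hash_value.toList) = cs
  simp only [pvFold_fst, pvFold_count, Bool.true_and, PySem.Chars.len_eq, pvSplitOn_eq]
  by_cases hhex : cs.all (fun c => PySem.Chars.isIn [c] pvHexDigits) = true
  · -- all-hex: no colon can occur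
    have hnm : ':' ∉ cs := by
      intro hm
      have := List.all_eq_true.mp hhex _ hm
      exact absurd this (by decide)
    have hcnt : cs.count ':' = 0 := List.count_eq_zero_of_not_mem hnm
    have hiin : PySem.Chars.isIn [':'] cs = false := by
      rw [← Bool.not_eq_true, pvIsIn_singleton]; exact hnm
    by_cases h32 : cs.length = 32
    · simp [h32, hhex, pvHexTable]; decide
    · by_cases h40 : cs.length = 40
      · simp [h40, hhex, pvHexTable]; decide
      · by_cases h64 : cs.length = 64
        · simp [h64, hhex, pvHexTable]; decide
        · by_cases h128 : cs.length = 128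
          · simp [h128, hhex, pvHexTable]; decide
          · simp [hhex, hiin, hcnt, pvHexTable, h32, h40, h64, h128]
            rw [if_neg (by omega), if_neg (by omega)]
  · -- not all hex: the table branch is off on both sides
    rw [Bool.not_eq_true] at hhex
    simp only [hhex, Bool.false_and, Bool.and_false, Bool.false_eq_true, if_false]
    by_cases hc : ':' ∈ cs
    · have hiin : PySem.Chars.isIn [':'] cs = true := (pvIsIn_singleton _ _).mpr hc
      have hcpos : 1 ≤ cs.count ':' := List.one_le_count_iff.mpr hc
      by_cases hone : cs.count ':' = 1
      · obtain ⟨u, v, rfl, hu, hv⟩ := pvCount_one_decomp cs hone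
        have hsp : pvSp (u ++ ':' :: v) [] = [u, v] := by
          rw [pvSp_split u hu v, pvSp_no_colon v hv]
          simp
        have htail : (List.foldl pvStep (true, 0, 0) (u ++ ':' :: v)).2.2 = (v.length : Int) := by
          rw [List.foldl_append, List.foldl_cons]
          rw [pvFold_tail_no_colon v hv]
          simp [pvStep]
        simp only [hone, hsp, htail, hiin, Bool.not_true, Bool.and_false,
          Bool.false_eq_true, if_false]
        by_cases hv32 : v.length = 32
        · simp [hv32, PySem.List.pyGetD]
        · have : ¬((v.length : Int) == 32) = true := by
            simp; omega
          simp [hv32, PySem.List.pyGetD, this]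
      · -- two or more colons
        have hlen : (pvSp cs []).length = cs.count ':' + 1 := pvSp_length cs []
        have hne2 : ¬((pvSp cs []).length == 2) = true := by
          simp [hlen]; omega
        have hne0 : ¬((0 : Int) + (cs.count ':' : Int) == 0) = true := by
          simp; omega
        have hne1 : ¬((0 : Int) + (cs.count ':' : Int) == 1) = true := by
          simp; omega
        simp only [hiin, Bool.not_true, Bool.and_false, if_pos]
        rw [if_neg (by simp)]
        simp [hne2]
        rw [if_neg (by omega), if_neg (fun h => hone h.1)]
    · have hiin : PySem.Chars.isIn [':'] cs = false := by
        rw [← Bool.not_eq_true, pvIsIn_singleton]; exact hc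
      have hcnt : cs.count ':' = 0 := List.count_eq_zero_of_not_mem hc
      simp [hiin, hcnt]
      by_cases h32 : cs.length = 32
      · simp [h32]
      · rw [if_neg h32, if_neg (by omega)]
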